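-- pv_equiv track=rewrite | github.com/peachpotato6/algorithm-study | PCCP/PCCP2/string_and_hash/palindrome/palindrome.py | solution
-- ===== SOURCE A (Python) =====
-- from collections import Counter
--
-- def solution(s):
--     answer = 0
--     sH = Counter(s)
--     use = False
--     for i in sH:
--         if (sH[i] % 2) == 0:
--             answer += sH[i]
--         elif (sH[i] % 2) == 1 and use == False:
--             answer += sH[i]
--             use = True
--         else:
--             answer += sH[i] - 1
--     return answer
-- ===== SOURCE B (Python) =====
-- def solution(s):
--     # Parity-toggle: 'odd' is the set of chars seen an odd number of times so far.
--     odd = set()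
--     for ch in s:
--         if ch in odd:
--             odd.discard(ch)
--         else:
--             odd.add(ch)
--     return len(s) - len(odd) + (1 if odd else 0)
-- ===== Notes on version B (the rewrite author's own statement) =====
-- stated objective: alternative
-- what changed: Drops the Counter entirely: a single pass toggles each character's membership in a parity set, and the answer is len(s) minus the number of odd-count characters plus one if any exist, instead of A's per-key loop over counts threading a first-odd flag.
import Mathlib
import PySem

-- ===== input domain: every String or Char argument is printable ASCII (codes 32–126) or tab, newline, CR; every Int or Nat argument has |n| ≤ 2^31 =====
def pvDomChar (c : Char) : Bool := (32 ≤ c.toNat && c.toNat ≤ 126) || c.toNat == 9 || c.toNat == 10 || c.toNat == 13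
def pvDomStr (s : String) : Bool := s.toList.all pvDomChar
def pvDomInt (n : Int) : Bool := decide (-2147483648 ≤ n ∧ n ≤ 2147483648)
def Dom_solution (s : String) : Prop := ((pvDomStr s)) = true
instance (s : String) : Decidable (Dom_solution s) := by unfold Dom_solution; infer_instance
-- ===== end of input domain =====

-- B drops the Counter: one pass toggles each char in a parity set; answer = len(s) - |odd set| + (1 if nonempty). Alternative algorithm, same cost.

-- ===== PORT A =====
-- A's loop over the Counter's keys, threading (answer, use)
def solution (s : String) : Int :=
  let sH := PySem.Dict.counter s.toList
  (sH.keys.foldl (fun (st : Int × Bool) i =>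
      let c := sH.getD i 0
      if PySem.Int.mod c 2 = 0 then (st.1 + c, st.2)
      else if PySem.Int.mod c 2 = 1 ∧ st.2 = false then (st.1 + c, true)
      else (st.1 + c - 1, st.2)) ((0 : Int), false)).1

-- ===== PORT B =====
-- parity-toggle set over the characters, then a closed combination
def solution_alt (s : String) : Int :=
  let odd := s.toList.foldl (fun (odd : PySem.Set Char) ch =>
      if PySem.Set.contains odd ch then PySem.Set.discard odd ch
      else PySem.Set.add odd ch) PySem.Set.empty
  PySem.Str.len s - PySem.Set.len odd + (if odd ≠ [] then 1 else 0)

-- ===== PRECONDITION & SPEC =====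
def Spec_solution (s : String) (out : Int) : Prop := out = solution_alt s
instance (s : String) (out : Int) : Decidable (Spec_solution s out) := by unfold Spec_solution; infer_instance

-- ===== CLAIM (what is proved, stated in full; the proofs are below) =====
def Claim_equal_solution : Prop := ∀ (s : String), Dom_solution s → Spec_solution s (solution s)

-- ===== LEMMAS AND PROOFS =====

-- A's step on a single count
def aStep (st : Int × Bool) (c : Int) : Int × Bool :=
  if PySem.Int.mod c 2 = 0 then (st.1 + c, st.2)
  else if PySem.Int.mod c 2 = 1 ∧ st.2 = false then (st.1 + c, true)
  else (st.1 + c - 1, st.2)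

-- B's toggle step
def bStep (odd : PySem.Set Char) (ch : Char) : PySem.Set Char :=
  if PySem.Set.contains odd ch then PySem.Set.discard odd ch else PySem.Set.add odd ch

lemma pymod_two (c : Int) : PySem.Int.mod c 2 = c % 2 :=
  PySem.Int.mod_eq_emod_of_pos (by norm_num)

lemma mod_two_cases (c : Int) : PySem.Int.mod c 2 = 0 ∨ PySem.Int.mod c 2 = 1 := by
  rw [pymod_two]; omega

lemma aLoop_invariant (vs : List Int) (a : Int) (u : Bool) :
    (vs.foldl aStep (a, u)).1 =
      a + (vs.map (fun c => c - PySem.Int.mod c 2)).sum +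
        (if u = false ∧ vs.any (fun c => PySem.Int.mod c 2 ≠ 0) then 1 else 0) := by
  induction vs generalizing a u with
  | nil => simp
  | cons c vs ih =>
    have e := pymod_two c
    rcases mod_two_cases c with h | h
    · have hm : c % 2 = 0 := by omega
      have h2 : (2 : Int) ∣ c := by omega
      simp [aStep, ih, hm]
      ring
    · have hm : c % 2 = 1 := by omega
      have h2 : ¬ (2 : Int) ∣ c := by omega
      cases u with
      | false =>
        simp [aStep, ih, hm]
        ring
      | true =>
        simp [aStep, ih, hm]
        ring

-- B's toggle fold: nodup, and membership means an odd count
lemma bFold_invariant (l : List Char) (acc : PySem.Set Char) (hn : acc.Nodup) :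
    (l.foldl bStep acc).Nodup ∧
      ∀ x, x ∈ l.foldl bStep acc ↔ ((x ∈ acc) ↔ l.count x % 2 = 0) := by
  induction l generalizing acc with
  | nil => exact ⟨hn, fun x => by simp⟩
  | cons c l ih =>
    have hstep : (bStep acc c).Nodup := by
      unfold bStep
      split
      · exact PySem.Set.nodup_discard acc c hn
      · exact PySem.Set.nodup_add acc c hn
    obtain ⟨h1, h2⟩ := ih (bStep acc c) hstep
    refine ⟨h1, fun x => ?_⟩
    rw [List.foldl_cons, h2 x]
    have hmem : x ∈ bStep acc c ↔ ¬ ((x ∈ acc) ↔ (x = c)) := by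
      unfold bStep
      by_cases hc : c ∈ acc
      · rw [if_pos ((PySem.Set.contains_iff acc c).mpr hc)]
        rw [PySem.Set.mem_discard]
        by_cases hxc : x = c
        · subst hxc; tauto
        · have hxc' : ¬ c = x := fun hh => hxc hh.symm
          tauto
      · rw [if_neg (fun h => hc ((PySem.Set.contains_iff acc c).mp h))]
        rw [PySem.Set.mem_add]
        by_cases hxc : x = c
        · subst hxc; tauto
        · have hxc' : ¬ c = x := fun hh => hxc hh.symm
          tauto
    rw [hmem]
    have hcount : (c :: l).count x = l.count x + (if x = c then 1 else 0) := by
      by_cases h : x = c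
      · simp [h]
      · have h' : ¬ c = x := fun hh => h hh.symm
        simp [h, h']
    rw [hcount]
    by_cases hxc : x = c
    · subst hxc
      rw [if_pos rfl]
      have hpar : (l.count x + 1) % 2 = 0 ↔ ¬ (l.count x % 2 = 0) := by omega
      rw [hpar]
      tauto
    · rw [if_neg hxc, add_zero]
      tauto

-- Σ (c - c%2) = Σ c - Σ (c%2)
lemma sum_sub_split (vs : List Int) :
    (vs.map (fun c => c - c % 2)).sum = vs.sum - (vs.map (fun c => c % 2)).sum := by
  induction vs with
  | nil => simp
  | cons a t ih => simp [ih]; ring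

-- sum of (count % 2) over a list of keys counts the odd keys
lemma sum_mod_two_eq_countP (f : Char → Int) (ks : List Char) :
    (ks.map (fun k => f k % 2)).sum = (ks.countP (fun k => f k % 2 ≠ 0) : Int) := by
  induction ks with
  | nil => simp
  | cons k ks ih =>
    rcases Int.emod_two_eq_zero_or_one (f k) with h | h <;>
      simp [h, ih] <;> omega

-- sum of counts over the distinct keys is the length
lemma sum_counts_eq_length (l : List Char) :
    ((PySem.Set.ofList l).map (fun k => (l.count k : Int))).sum = (l.length : Int) := by
  have hperm : (PySem.Set.ofList l).Perm l.dedup := by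
    apply (List.perm_ext_iff_of_nodup (PySem.Set.nodup_ofList l) (List.nodup_dedup l)).mpr
    intro x; simp [PySem.Set.mem_ofList, List.mem_dedup]
  have hmap := List.Perm.map (fun k => (l.count k : Int)) hperm
  rw [hmap.sum_eq]
  have hcast : (l.dedup.map fun k => (l.count k : Int)).sum
      = ((l.dedup.map fun k => l.count k).sum : Int) := by
    induction l.dedup with
    | nil => simp
    | cons a t ih => push_cast [List.map_cons, List.sum_cons, ih]; ring
  rw [hcast, List.sum_map_count_dedup_eq_length]

theorem solution_spec : Claim_equal_solution := by
  intro s _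
  unfold Spec_solution solution solution_alt
  simp only
  set l := s.toList with hl
  -- A: rewrite the keys-foldl into a foldl of aStep over the counts
  have hkeys : (PySem.Dict.counter l).keys = PySem.Set.ofList l :=
    PySem.Dict.keys_counter l
  have hfold : ∀ (ks : List Char) (st : Int × Bool),
      ks.foldl (fun st i =>
        let c := (PySem.Dict.counter l).getD i 0
        if PySem.Int.mod c 2 = 0 then (st.1 + c, st.2)
        else if PySem.Int.mod c 2 = 1 ∧ st.2 = false then (st.1 + c, true)
        else (st.1 + c - 1, st.2)) st
      = (ks.map (fun k => (l.count k : Int))).foldl aStep st := by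
    intro ks
    induction ks with
    | nil => intro st; rfl
    | cons k ks ih =>
      intro st
      simp only [List.foldl_cons, List.map_cons]
      rw [ih]
      simp only [PySem.Dict.getD_counter, aStep]
  rw [hkeys, hfold, aLoop_invariant]
  simp only [pymod_two]
  rw [sum_sub_split, sum_counts_eq_length, List.map_map]
  have hcomp : ((PySem.Set.ofList l).map ((fun c => c % 2) ∘ fun k => (l.count k : Int))).sum
      = ((PySem.Set.ofList l).map (fun k => ((l.count k : Int)) % 2)).sum := rfl
  rw [hcomp, sum_mod_two_eq_countP (fun k => (l.count k : Int))]
  -- B: characterize the odd set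
  obtain ⟨hnodup, hmem⟩ := bFold_invariant l PySem.Set.empty (by simp [PySem.Set.empty])
  have hbs : l.foldl (fun (odd : PySem.Set Char) ch =>
      if PySem.Set.contains odd ch then PySem.Set.discard odd ch
      else PySem.Set.add odd ch) PySem.Set.empty = l.foldl bStep PySem.Set.empty := rfl
  rw [hbs]
  set odd := l.foldl bStep PySem.Set.empty with hodd
  have hmem' : ∀ x, x ∈ odd ↔ x ∈ l ∧ l.count x % 2 = 1 := by
    intro x
    rw [hmem x]
    constructor
    · intro h
      have hc : l.count x % 2 = 1 := by
        by_contra hc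
        have h0 : l.count x % 2 = 0 := by omega
        simp [PySem.Set.empty, h0] at h
      exact ⟨List.count_pos_iff.mp (by omega), hc⟩
    · rintro ⟨_, hc⟩
      simp [PySem.Set.empty]
      omega
  -- |odd| = number of odd-count keys among the distinct keys
  have hlen : odd.length = ((PySem.Set.ofList l).countP
      (fun k => ((l.count k : Int)) % 2 ≠ 0)) := by
    rw [List.countP_eq_length_filter]
    apply List.Perm.length_eq
    apply (List.perm_ext_iff_of_nodup hnodup
      (List.Nodup.filter _ (PySem.Set.nodup_ofList l))).mpr
    intro x
    rw [hmem' x, List.mem_filter, PySem.Set.mem_ofList]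
    constructor
    · rintro ⟨hx, hc⟩
      exact ⟨hx, by simp; omega⟩
    · rintro ⟨hx, hc⟩
      simp at hc
      exact ⟨hx, by omega⟩
  -- odd nonempty ↔ some key has an odd count
  have hany : (odd ≠ []) ↔
      (((PySem.Set.ofList l).map (fun k => (l.count k : Int))).any
        (fun c => c % 2 ≠ 0) = true) := by
    rw [List.any_map]
    simp only [List.any_eq_true, Function.comp]
    constructor
    · intro h
      obtain ⟨x, hx⟩ := List.exists_mem_of_ne_nil odd h
      obtain ⟨hxl, hxc⟩ := (hmem' x).mp hx
      exact ⟨x, (PySem.Set.mem_ofList l x).mpr hxl, by simp; omega⟩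
    · rintro ⟨x, hx, hc⟩
      simp at hc
      have hxo : x ∈ odd := (hmem' x).mpr ⟨(PySem.Set.mem_ofList l x).mp hx, by omega⟩
      exact fun h => by simp [h] at hxo
  have hstrlen : PySem.Str.len s = (l.length : Int) := by
    simp [PySem.Str.len_eq, hl]
  have hsetlen : PySem.Set.len odd = (odd.length : Int) := by
    simp [PySem.Set.len]
  rw [hstrlen, hsetlen, hlen]
  by_cases hne : odd = []
  · have hfalse : ¬ ((((PySem.Set.ofList l).map (fun k => (l.count k : Int))).any
        (fun c => c % 2 ≠ 0)) = true) := fun h => (hany.mpr h) hne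
    rw [if_neg (fun h => hfalse h.2), if_neg (fun h => h hne)]
    ring
  · rw [if_pos hne, if_pos ⟨trivial, hany.mp hne⟩]
    ring
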